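-- pv_equiv track=rewrite | github.com/shilohchiu/pizzatron | pizzatron/functions.py | replace_blank
-- ===== SOURCE A (Python) =====
-- def str_to_lst(str):
--   lst = []
--   for char in str:
--     lst.append(char)
--   return lst
--
-- def replace_blank(topping, pizza):
--   lst = str_to_lst(pizza)
--
--   for c in range(len(lst)):
--     if lst[c] == '_' and \
--     lst[c - 1] == '(' and lst[c+1] == ')':
--       lst[c] = topping
--
--     new_pizza = ''
--     p = 0
--     for _ in lst:
--         new_pizza += lst[p]
--         p += 1
--
--   return new_pizza
-- ===== SOURCE B (Python) =====
-- def replace_blank(topping, pizza):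
--     return pizza.replace('(_)', '(' + topping + ')')
-- ===== Notes on version B (the rewrite author's own statement) =====
-- stated objective: faster
-- what changed: B performs one substring substitution, pizza.replace('(_)', '(' + topping + ')'), instead of A's index loop over a mutable character list that re-joins the entire list on every iteration; B also drops Python's accidental negative-index wraparound at position 0.
-- intended difference: When the pizza string starts with '_', its second character is ')' and its LAST character is '(' (and topping != '_'), A's lst[c-1] at c=0 wraps to the last character and A replaces the leading '_' with topping (e.g. A('ham','_)x(') = 'ham)x('); B leaves it as '_' ('_)x('), the intended value since that '_' is not between '(' and ')'. — e.g. on replace_blank("ham", "_)x("): A returns "ham)x(", B returns "_)x("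
import Mathlib
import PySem

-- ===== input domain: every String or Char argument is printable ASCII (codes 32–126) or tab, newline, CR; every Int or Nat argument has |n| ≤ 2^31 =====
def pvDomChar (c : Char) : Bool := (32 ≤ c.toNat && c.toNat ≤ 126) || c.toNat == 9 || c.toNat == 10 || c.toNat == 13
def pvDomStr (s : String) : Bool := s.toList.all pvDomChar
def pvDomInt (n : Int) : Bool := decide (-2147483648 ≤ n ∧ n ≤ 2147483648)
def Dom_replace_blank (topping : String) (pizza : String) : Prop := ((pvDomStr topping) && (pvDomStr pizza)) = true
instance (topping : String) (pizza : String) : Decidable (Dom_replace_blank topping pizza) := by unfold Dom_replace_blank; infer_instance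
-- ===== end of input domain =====

-- B replaces the whole task by one substring substitution, pizza.replace('(_)', '(' + topping + ')'),
-- instead of A's index scan that re-joins the whole character list on every iteration; A's
-- negative-index wraparound at position 0 is stated as the intended difference D_ below.

-- ===== PORT A =====
-- helper str_to_lst: builds the list of 1-character strings by appending, as the Python does
def str_to_lst (s : String) : List String :=
  s.toList.foldl (fun lst ch => lst ++ [String.ofList [ch]]) []

-- literal port of A: for c in range(len(lst)) mutating lst, and the inner join loop that
-- rebuilds new_pizza on EVERY outer iteration.  lst[c-1] is Python negative indexing
-- (PySem.List.pyGet?); lst[c+1] is out of range exactly where Python raises IndexError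
-- (excluded by Pre_, the port's `= some ")"` is then false); new_pizza starts as "" where
-- Python leaves it unbound (the empty pizza, excluded by Pre_); lst[p] in the inner loop is
-- always in range, so `.getD ""` is exact.
def replace_blank (topping : String) (pizza : String) : String :=
  let lst0 := str_to_lst pizza
  ((PySem.List.pyRange 0 (lst0.length : Int) 1).foldl
    (fun (st : List String × String) c =>
      let lst := if PySem.List.pyGet? st.1 c = some "_" ∧ PySem.List.pyGet? st.1 (c - 1) = some "(" ∧ PySem.List.pyGet? st.1 (c + 1) = some ")"
        then PySem.List.pySetD st.1 c topping else st.1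
      (lst, (lst.foldl (fun (q : String × Int) _ => (q.1 ++ (PySem.List.pyGet? lst q.2).getD "", q.2 + 1)) ("", 0)).1))
    (lst0, "")).2

-- ===== PORT B =====
-- literal port of Source B: one call to str.replace (PySem.Str.replace), substituting every
-- occurrence of the three-character pattern "(_)" by "(" ++ topping ++ ")".
def replace_blank_alt (topping : String) (pizza : String) : String :=
  PySem.Str.replace pizza "(_)" ("(" ++ topping ++ ")")

-- ===== PRECONDITION & SPEC =====
-- Pre_ excludes exactly the inputs where the Python A raises: the empty pizza
-- (UnboundLocalError: new_pizza) and a pizza ending in "(_" (IndexError on lst[c+1] at the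
-- last index).  A returns normally everywhere else.
def Pre_replace_blank (topping : String) (pizza : String) : Prop :=
  pizza.toList ≠ [] ∧
  ¬ (PySem.List.pyGet? pizza.toList (-1) = some '_' ∧ PySem.List.pyGet? pizza.toList (-2) = some '(')
instance (topping : String) (pizza : String) : Decidable (Pre_replace_blank topping pizza) := by
  unfold Pre_replace_blank; infer_instance
def pvWitness_replace_blank : String × String := ("ham", "(_) and (_)")

-- When pizza starts with '_', its second character is ')' and its LAST character is '(' (and
-- topping ≠ "_"), A's lst[c-1] at c=0 wraps to the last character and A replaces the leading
-- '_' with topping; B leaves it unchanged — the intended value, since that '_' is not between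
-- '(' and ')'.
def D_replace_blank (topping : String) (pizza : String) : Prop :=
  topping ≠ "_" ∧
  pizza.toList[0]? = some '_' ∧ pizza.toList[1]? = some ')' ∧
  PySem.List.pyGet? pizza.toList (-1) = some '('
instance (topping : String) (pizza : String) : Decidable (D_replace_blank topping pizza) := by
  unfold D_replace_blank; infer_instance

def Spec_replace_blank (topping : String) (pizza : String) (out : String) : Prop :=
  ¬ D_replace_blank topping pizza → out = replace_blank_alt topping pizza
instance (topping : String) (pizza : String) (out : String) : Decidable (Spec_replace_blank topping pizza out) := by
  unfold Spec_replace_blank; infer_instance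

def pvDiffWitness_replace_blank : String × String := ("ham", "_)x(")
def pvDiffWitnessOut_replace_blank : String × String := ("ham)x(", "_)x(")

-- ===== CLAIM (what is proved, stated in full; the proofs are below) =====
def Claim_unchanged_replace_blank : Prop := ∀ (topping : String) (pizza : String), Dom_replace_blank topping pizza → Pre_replace_blank topping pizza → Spec_replace_blank topping pizza (replace_blank topping pizza)
def Claim_changed_replace_blank : Prop := Dom_replace_blank (pvDiffWitness_replace_blank.1) (pvDiffWitness_replace_blank.2) ∧ Pre_replace_blank (pvDiffWitness_replace_blank.1) (pvDiffWitness_replace_blank.2) ∧ D_replace_blank (pvDiffWitness_replace_blank.1) (pvDiffWitness_replace_blank.2) ∧ replace_blank (pvDiffWitness_replace_blank.1) (pvDiffWitness_replace_blank.2) = pvDiffWitnessOut_replace_blank.1 ∧ replace_blank_alt (pvDiffWitness_replace_blank.1) (pvDiffWitness_replace_blank.2) = pvDiffWitnessOut_replace_blank.2 ∧ pvDiffWitnessOut_replace_blank.1 ≠ pvDiffWitnessOut_replace_blank.2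
def Claim_exact_replace_blank : Prop := ∀ (topping : String) (pizza : String), Dom_replace_blank topping pizza → Pre_replace_blank topping pizza → D_replace_blank topping pizza → replace_blank topping pizza ≠ replace_blank_alt topping pizza

-- ===== LEMMAS AND PROOFS =====

-- str_to_lst is the map to 1-character strings
theorem strToLst_eq (s : String) :
    str_to_lst s = s.toList.map (fun c => String.ofList [c]) := by
  simpa [str_to_lst] using PySem.List.foldl_append_singleton_eq_map (fun c => String.ofList [c]) s.toList []

-- condition over the ORIGINAL list
def condO (g : List String) (i : Int) : Bool :=
  (PySem.List.pyGet? g i == some "_") && (PySem.List.pyGet? g (i - 1) == some "(") && (PySem.List.pyGet? g (i + 1) == some ")")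

def hyb (t : String) (g : List String) (k : Nat) : List String :=
  (List.range g.length).map (fun i => if i < k ∧ condO g (i : Int) = true then t else g.getD i "")

theorem hyb_zero (t : String) (g : List String) : hyb t g 0 = g := by
  apply List.ext_getElem
  · simp [hyb]
  · intro i h1 h2; simp [hyb, List.getElem?_eq_getElem h2]

theorem length_hyb (t : String) (g : List String) (k : Nat) : (hyb t g k).length = g.length := by
  simp [hyb]

theorem getElem?_hyb (t : String) (g : List String) (k i : Nat) (h : i < g.length) :
    (hyb t g k)[i]? = some (if i < k ∧ condO g (i : Int) = true then t else g.getD i "") := by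
  simp [hyb, h]

theorem getElem?_hyb_none (t : String) (g : List String) (k i : Nat) (h : ¬ i < g.length) :
    (hyb t g k)[i]? = none := by
  rw [List.getElem?_eq_none_iff]; simpa [hyb] using Nat.le_of_not_lt h

-- inner join loop: concatenates all of lst
theorem inner_aux (lst : List String) (l : List String) : ∀ (j : Nat) (acc : String),
    ((l.foldl (fun (q : String × Int) _ => (q.1 ++ (PySem.List.pyGet? lst q.2).getD "", q.2 + 1)) (acc, (j : Int))).1).toList
    = acc.toList ++ ((List.range l.length).map (fun i => ((PySem.List.pyGet? lst ((j + i : Nat) : Int)).getD "").toList)).flatten := by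
  induction l with
  | nil => intro j acc; simp
  | cons x tl ih =>
      intro j acc
      have h1 : ((j : Int) + 1) = ((j + 1 : Nat) : Int) := by push_cast; ring
      simp only [List.foldl_cons, h1, ih (j+1) _]
      simp [List.range_succ_eq_map, List.map_map]
      congr 1
      apply List.map_congr_left
      intro i _
      simp only [Function.comp]
      congr 3
      push_cast; ring

theorem inner_full (lst : List String) :
    ((lst.foldl (fun (q : String × Int) _ => (q.1 ++ (PySem.List.pyGet? lst q.2).getD "", q.2 + 1)) (("" : String), (0 : Int))).1).toList
    = (lst.map String.toList).flatten := by
  have h0 : ((0:Int)) = ((0:Nat):Int) := rfl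
  rw [h0, inner_aux lst lst 0 ""]
  simp only [String.toList_empty, List.nil_append]
  congr 1
  apply List.ext_getElem
  · simp
  · intro i h1 h2
    simp only [List.getElem_map, List.getElem_range]
    rw [PySem.List.pyGet?_natCast]
    simp_all

-- pyGet? of hyb at an unmodified (≥ k) natural index is the original entry
theorem pyGet?_hyb_ge (t : String) (g : List String) (k i : Nat) (h : k ≤ i) :
    PySem.List.pyGet? (hyb t g k) (i : Int) = g[i]? := by
  rw [PySem.List.pyGet?_natCast]
  by_cases hi : i < g.length
  · rw [getElem?_hyb t g k i hi]
    have hni : ¬ (i < k ∧ condO g (i : Int) = true) := fun hh => absurd hh.1 (by omega)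
    simp [hni, List.getElem?_eq_getElem hi]
  · rw [getElem?_hyb_none t g k i hi, eq_comm, List.getElem?_eq_none_iff]; omega

-- the condition A's loop evaluates on the current list equals condO on the original
theorem condEval (t : String) (g : List String) (k : Nat) (hk : k < g.length) :
    ((PySem.List.pyGet? (hyb t g k) (k : Int) = some "_" ∧
      PySem.List.pyGet? (hyb t g k) ((k : Int) - 1) = some "(" ∧
      PySem.List.pyGet? (hyb t g k) ((k : Int) + 1) = some ")")
     ↔ condO g (k : Int) = true) := by
  have e1 : PySem.List.pyGet? (hyb t g k) (k : Int) = PySem.List.pyGet? g (k : Int) := by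
    rw [pyGet?_hyb_ge t g k k le_rfl, PySem.List.pyGet?_natCast]
  have e3 : PySem.List.pyGet? (hyb t g k) ((k : Int) + 1) = PySem.List.pyGet? g ((k : Int) + 1) := by
    have : ((k : Int) + 1) = ((k + 1 : Nat) : Int) := by push_cast; ring
    rw [this, pyGet?_hyb_ge t g k (k+1) (by omega), PySem.List.pyGet?_natCast]
  cases k with
  | zero =>
      simp only [Nat.cast_zero, hyb_zero] at e1 e3 ⊢
      rw [condO]
      simp only [Bool.and_eq_true, beq_iff_eq]
      tauto
  | succ m =>
      have e2n : ((m + 1 : Nat) : Int) - 1 = ((m : Nat) : Int) := by push_cast; ring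
      rw [e1, e3, e2n]
      by_cases hc : condO g (m : Int) = true
      · -- position m was replaced; but then g[m+1] = ")" so both sides are false
        have hg : PySem.List.pyGet? g ((m + 1 : Nat) : Int) = some ")" := by
          have := hc; rw [condO] at this
          simp only [Bool.and_eq_true, beq_iff_eq] at this
          have h3 := this.2
          have : ((m : Int) + 1) = ((m + 1 : Nat) : Int) := by push_cast; ring
          rw [this] at h3; exact h3
        constructor
        · intro h; rw [hg] at h; simp at h
        · intro h; rw [condO] at h; simp only [Bool.and_eq_true, beq_iff_eq] at h
          exfalso; rw [hg] at h; simp at h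
      · -- position m unreplaced
        have e2 : PySem.List.pyGet? (hyb t g (m+1)) (m : Int) = PySem.List.pyGet? g (m : Int) := by
          rw [PySem.List.pyGet?_natCast, getElem?_hyb t g (m+1) m (by omega), PySem.List.pyGet?_natCast]
          have hni : ¬ (m < m + 1 ∧ condO g (m : Int) = true) := fun hh => absurd hh.2 hc
          simp [List.getElem?_eq_getElem (show m < g.length by omega)]
          exact fun h => absurd h hc
        rw [e2, condO]
        simp only [Bool.and_eq_true, beq_iff_eq]
        rw [e2n]
        tauto

-- the assignment lst[c] = topping advances the hybrid
theorem set_hyb_pos (t : String) (g : List String) (k : Nat) (hk : k < g.length)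
    (hc : condO g (k : Int) = true) :
    PySem.List.pySetD (hyb t g k) (k : Int) t = hyb t g (k + 1) := by
  rw [PySem.List.pySetD_natCast]
  apply List.ext_getElem
  · simp [hyb]
  · intro i h1 h2
    simp only [List.length_set, length_hyb] at h1
    rw [List.getElem_set]
    simp only [hyb, List.getElem_map, List.getElem_range]
    by_cases hik : i = k
    · subst hik; simp [hc]
    · have heq : (i ≤ k ∧ condO g (i:Int) = true) ↔ (i < k ∧ condO g (i:Int) = true) := by
        constructor
        · rintro ⟨h3, h4⟩; exact ⟨by omega, h4⟩
        · rintro ⟨h3, h4⟩; exact ⟨by omega, h4⟩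
      simp [Ne.symm hik, heq]

theorem set_hyb_neg (t : String) (g : List String) (k : Nat)
    (hc : ¬ condO g (k : Int) = true) :
    hyb t g k = hyb t g (k + 1) := by
  unfold hyb
  apply List.map_congr_left
  intro i _
  by_cases hik : i = k
  · subst hik; simp [hc]
  · have heq : (i ≤ k ∧ condO g (i:Int) = true) ↔ (i < k ∧ condO g (i:Int) = true) := by
      constructor
      · rintro ⟨h3, h4⟩; exact ⟨by omega, h4⟩
      · rintro ⟨h3, h4⟩; exact ⟨by omega, h4⟩
    simp [heq]

-- the outer loop invariant
theorem outer_inv (t : String) (g : List String) :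
    ∀ (k : Nat), k ≤ g.length →
    ((PySem.List.pyRange 0 (k : Int) 1).foldl
      (fun (st : List String × String) c =>
        let lst := if PySem.List.pyGet? st.1 c = some "_" ∧ PySem.List.pyGet? st.1 (c - 1) = some "(" ∧ PySem.List.pyGet? st.1 (c + 1) = some ")"
          then PySem.List.pySetD st.1 c t else st.1
        (lst, (lst.foldl (fun (q : String × Int) _ => (q.1 ++ (PySem.List.pyGet? lst q.2).getD "", q.2 + 1)) ("", 0)).1))
      (g, "")).1 = hyb t g k ∧
    ((PySem.List.pyRange 0 (k : Int) 1).foldl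
      (fun (st : List String × String) c =>
        let lst := if PySem.List.pyGet? st.1 c = some "_" ∧ PySem.List.pyGet? st.1 (c - 1) = some "(" ∧ PySem.List.pyGet? st.1 (c + 1) = some ")"
          then PySem.List.pySetD st.1 c t else st.1
        (lst, (lst.foldl (fun (q : String × Int) _ => (q.1 ++ (PySem.List.pyGet? lst q.2).getD "", q.2 + 1)) ("", 0)).1))
      (g, "")).2.toList = (if k = 0 then [] else ((hyb t g k).map String.toList).flatten) := by
  intro k
  induction k with
  | zero =>
      intro _
      rw [PySem.List.pyRange_one_eq_nil (by omega)]
      simp [hyb_zero]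
  | succ m ih =>
      intro hm
      have hm' : m ≤ g.length := by omega
      obtain ⟨ih1, ih2⟩ := ih hm'
      have hr : PySem.List.pyRange 0 ((m + 1 : Nat) : Int) 1 = PySem.List.pyRange 0 (m : Int) 1 ++ [(m : Int)] := by
        have : ((m + 1 : Nat) : Int) = (m : Int) + 1 := by push_cast; ring
        rw [this, PySem.List.pyRange_one_succ_right (by omega)]
      rw [hr, List.foldl_append, List.foldl_cons, List.foldl_nil]
      rw [ih1] at *
      have hkl : m < g.length := by omega
      by_cases hc : condO g (m : Int) = true
      · have hcond := (condEval t g m hkl).mpr hc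
        simp only [hcond, set_hyb_pos t g m hkl hc]
        refine ⟨rfl, ?_⟩
        simp [inner_full]
      · have hcond : ¬ (PySem.List.pyGet? (hyb t g m) (m : Int) = some "_" ∧ PySem.List.pyGet? (hyb t g m) ((m : Int) - 1) = some "(" ∧ PySem.List.pyGet? (hyb t g m) ((m : Int) + 1) = some ")") := by
          intro hcd; exact hc ((condEval t g m hkl).mp hcd)
        simp only [if_neg hcond]
        rw [set_hyb_neg t g m hc]
        refine ⟨rfl, ?_⟩
        simp [inner_full]

-- the same condition read over the characters of the original string
def condC (s : List Char) (i : Int) : Bool :=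
  (PySem.List.pyGet? s i == some '_') && (PySem.List.pyGet? s (i - 1) == some '(') && (PySem.List.pyGet? s (i + 1) == some ')')

theorem pyGet?_map_chars (s : List Char) (f : Char → String) (i : Int) :
    PySem.List.pyGet? (s.map f) i = (PySem.List.pyGet? s i).map f := by
  simp [PySem.List.pyGet?, PySem.List.pyIdx?]

theorem ofList_eq_iff (c d : Char) : String.ofList [c] = String.ofList [d] ↔ c = d := by
  constructor
  · intro h; have := congrArg String.toList h; simpa using this
  · intro h; subst h; rfl

theorem ofList_eq_underscore (c : Char) : String.ofList [c] = "_" ↔ c = '_' := by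
  rw [show ("_" : String) = String.ofList ['_'] from rfl, ofList_eq_iff]

theorem ofList_eq_lparen (c : Char) : String.ofList [c] = "(" ↔ c = '(' := by
  rw [show ("(" : String) = String.ofList ['('] from rfl, ofList_eq_iff]

theorem ofList_eq_rparen (c : Char) : String.ofList [c] = ")" ↔ c = ')' := by
  rw [show (")" : String) = String.ofList [')'] from rfl, ofList_eq_iff]

theorem condO_map (s : List Char) (i : Int) :
    condO (s.map (fun c => String.ofList [c])) i = condC s i := by
  unfold condO condC
  rw [pyGet?_map_chars, pyGet?_map_chars, pyGet?_map_chars]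
  rw [Bool.eq_iff_iff]
  rcases PySem.List.pyGet? s i with _ | c <;>
    rcases PySem.List.pyGet? s (i - 1) with _ | d <;>
      rcases PySem.List.pyGet? s (i + 1) with _ | e <;>
        simp [Bool.and_eq_true, beq_iff_eq,
          show ("_" : String) = String.ofList ['_'] from rfl,
          show ("(" : String) = String.ofList ['('] from rfl,
          show (")" : String) = String.ofList [')'] from rfl,
          ofList_eq_underscore, ofList_eq_lparen, ofList_eq_rparen]

-- A as a single pass over the characters of pizza
theorem A_chars (t p : String) :
    (replace_blank t p).toList
    = ((List.range p.toList.length).map (fun (i : Nat) =>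
        (if condC p.toList (i : Int) = true then t else String.ofList [p.toList.getD i ' ']).toList)).flatten := by
  simp only [replace_blank]
  rw [(outer_inv t (str_to_lst p) (str_to_lst p).length le_rfl).2]
  rw [strToLst_eq]
  by_cases h0 : p.toList.length = 0
  · simp [h0]
  · rw [if_neg (by simpa using h0)]
    simp only [List.length_map]
    unfold hyb
    rw [List.length_map, List.map_map]
    congr 1
    apply List.map_congr_left
    intro i hi
    have hi' : i < p.toList.length := List.mem_range.mp hi
    simp only [Function.comp_apply]
    congr 1
    rw [condO_map]
    by_cases hc : condC p.toList (i : Int) = true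
    · rw [if_pos ⟨hi', hc⟩, if_pos hc]
    · simp only [hc]
      rw [List.getD_eq_getElem?_getD, List.getD_eq_getElem?_getD,
        List.getElem?_eq_getElem (by simpa using hi'), List.getElem?_eq_getElem hi']
      simp

-- ===== B-side: str.replace with the pattern "(_)" =====

-- the recursive shape of replacing "(_)" by '(' :: nw ++ [')'] left to right
def repl (nw : List Char) : List Char → List Char
  | '('::'_'::')'::rest => '(' :: (nw ++ ')' :: repl nw rest)
  | c::rest => c :: repl nw rest
  | [] => []

theorem repl_cons (nw : List Char) (c : Char) (t : List Char)
    (hn : ∀ r, c = '(' → t = '_'::')'::r → False) :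
    repl nw (c :: t) = c :: repl nw t := by
  rw [repl.eq_def]
  split
  · rename_i rest heq
    injection heq with h1 h2
    exact absurd (hn rest h1 h2) (fun h => h)
  · rename_i heq
    injection heq with h1 h2
    subst h1; subst h2; rfl
  · rename_i heq; cases heq

theorem prefix_iff (l : List Char) :
    (['(','_',')'].isPrefixOf l = true) ↔ ∃ rest, l = '('::'_'::')'::rest := by
  constructor
  · intro h
    cases l with
    | nil => simp [List.isPrefixOf] at h
    | cons a t =>
        cases t with
        | nil => simp [List.isPrefixOf] at h
        | cons b u =>
            cases u with
            | nil => simp [List.isPrefixOf] at h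
            | cons d v =>
                simp [List.isPrefixOf] at h
                obtain ⟨h1, h2, h3⟩ := h
                exact ⟨v, by rw [h1, h2, h3]⟩
  · rintro ⟨rest, rfl⟩; simp [List.isPrefixOf]

-- PySem's replace loop computes repl when given enough fuel
theorem go_spec (nw : List Char) : ∀ (fuel : Nat) (l acc : List Char), l.length ≤ fuel →
    PySem.Chars.replace.go ['(','_',')'] ('(' :: (nw ++ [')'])) fuel l acc = acc.reverse ++ repl nw l := by
  intro fuel
  induction fuel with
  | zero =>
      intro l acc h
      have : l = [] := by cases l <;> simp_all
      subst this
      rw [PySem.Chars.replace.go]; simp [repl]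
  | succ m ih =>
      intro l acc h
      cases l with
      | nil => rw [PySem.Chars.replace.go]; simp [repl]; omega
      | cons c t =>
          rw [PySem.Chars.replace.go]
          by_cases hp : ['(','_',')'].isPrefixOf (c::t) = true
          · rw [if_pos hp]
            obtain ⟨rest, heq⟩ := (prefix_iff _).mp hp
            injection heq with h1 h2; subst h1; subst h2
            simp only [List.length_cons] at h
            rw [show List.drop (['(','_',')'] : List Char).length ('('::'_'::')'::rest) = rest from rfl]
            rw [ih rest _ (by omega)]
            simp [show repl nw ('('::'_'::')'::rest) = '(' :: (nw ++ ')' :: repl nw rest) from rfl]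
          · rw [if_neg hp]
            simp only [List.length_cons] at h
            rw [ih t _ (by omega)]
            have hn : ¬ (c = '(' ∧ t.head? = some '_' ∧ t.tail.head? = some ')') := by
              intro ⟨h1, h2, h3⟩
              apply hp
              subst h1
              cases t with
              | nil => simp at h2
              | cons x u =>
                  simp at h2; subst h2
                  cases u with
                  | nil => simp at h3
                  | cons y v => simp at h3; subst h3; simp [List.isPrefixOf]
            have hn' : ∀ r, c = '(' → t = '_'::')'::r → False := by
              rintro r h1 rfl; exact hn ⟨h1, rfl, rfl⟩
            rw [repl_cons nw c t hn']
            simp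

-- the per-position piece of repl's output, read over the ORIGINAL string (Nat indices)
def pieceN (nw : List Char) (s : List Char) (i : Nat) : List Char :=
  if 1 ≤ i ∧ i + 1 < s.length ∧ s[i]? = some '_' ∧ s[i-1]? = some '(' ∧ s[i+1]? = some ')' then nw
  else [s.getD i ' ']

theorem pieceN_zero (nw : List Char) (s : List Char) : pieceN nw s 0 = [s.getD 0 ' '] := by
  rw [pieceN, if_neg]; rintro ⟨h, -⟩; omega

theorem pieceN_shift1 (nw : List Char) (c : Char) (t : List Char)
    (hn : ∀ r, c = '(' → t = '_'::')'::r → False) (i : Nat) :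
    pieceN nw (c::t) (i+1) = pieceN nw t i := by
  cases i with
  | zero =>
      have hg : ¬ (1 ≤ 1 ∧ 1 + 1 < (c::t).length ∧ (c::t)[1]? = some '_' ∧ (c::t)[1-1]? = some '(' ∧ (c::t)[1+1]? = some ')') := by
        rintro ⟨-, hlen, h1, h0, h2⟩
        simp at h0 h1 h2
        apply hn (t.drop 2) h0
        cases t with
        | nil => simp at h1
        | cons x u =>
            simp at h1; subst h1
            cases u with
            | nil => simp at h2
            | cons y v => simp at h2; subst h2; simp
      simp only [pieceN, if_neg hg]
      have : ¬ (1 ≤ 0 ∧ 0 + 1 < t.length ∧ t[0]? = some '_' ∧ t[0-1]? = some '(' ∧ t[0+1]? = some ')') := by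
        rintro ⟨h, -⟩; omega
      rw [if_neg this]
      simp [List.getD]
  | succ k =>
      have hiff : (1 ≤ k+1+1 ∧ k+1+1+1 < (c::t).length ∧ (c::t)[k+1+1]? = some '_' ∧ (c::t)[k+1+1-1]? = some '(' ∧ (c::t)[k+1+1+1]? = some ')')
          ↔ (1 ≤ k+1 ∧ k+1+1 < t.length ∧ t[k+1]? = some '_' ∧ t[k+1-1]? = some '(' ∧ t[k+1+1]? = some ')') := by
        simp only [List.getElem?_cons_succ, List.length_cons, Nat.add_sub_cancel]
        constructor
        · rintro ⟨-, a, b, cc, d⟩; exact ⟨by omega, by omega, b, cc, d⟩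
        · rintro ⟨-, a, b, cc, d⟩; exact ⟨by omega, by omega, b, cc, d⟩
      simp only [pieceN]
      rw [if_congr hiff rfl rfl]
      split
      · rfl
      · simp [List.getD]

theorem pieceN_shift1' (nw : List Char) (c : Char) (t : List Char) (k : Nat) :
    pieceN nw (c::t) (k+2) = pieceN nw t (k+1) := by
  have hiff : (1 ≤ k+1+1 ∧ k+1+1+1 < (c::t).length ∧ (c::t)[k+1+1]? = some '_' ∧ (c::t)[k+1+1-1]? = some '(' ∧ (c::t)[k+1+1+1]? = some ')')
      ↔ (1 ≤ k+1 ∧ k+1+1 < t.length ∧ t[k+1]? = some '_' ∧ t[k+1-1]? = some '(' ∧ t[k+1+1]? = some ')') := by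
    simp only [List.getElem?_cons_succ, List.length_cons, Nat.add_sub_cancel]
    constructor
    · rintro ⟨-, a, b, cc, d⟩; exact ⟨by omega, by omega, b, cc, d⟩
    · rintro ⟨-, a, b, cc, d⟩; exact ⟨by omega, by omega, b, cc, d⟩
  simp only [pieceN]
  rw [if_congr hiff rfl rfl]
  split
  · rfl
  · simp [List.getD]

-- repl is the flatten of the per-position pieces
theorem flattenN (nw : List Char) : ∀ s, ((List.range s.length).map (pieceN nw s)).flatten = repl nw s := by
  intro s
  induction s using repl.induct with
  | case3 => simp [repl]
  | case1 rest ih =>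
      have hlen : (('(' :: '_' :: ')' :: rest) : List Char).length = 3 + rest.length := by simp; omega
      rw [hlen, List.range_add]
      simp only [List.map_append, List.flatten_append, List.map_map]
      have h3 : List.range 3 = [0, 1, 2] := by decide
      have p0 : pieceN nw ('('::'_'::')'::rest) 0 = ['('] := by simp [pieceN]
      have p1 : pieceN nw ('('::'_'::')'::rest) 1 = nw := by
        rw [pieceN, if_pos]; refine ⟨le_refl 1, by simp, by simp, by simp, by simp⟩
      have p2 : pieceN nw ('('::'_'::')'::rest) 2 = [')'] := by
        rw [pieceN, if_neg]
        · simp [List.getD]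
        · rintro ⟨-, -, h, -⟩; simp at h
      have hsh : ∀ i, pieceN nw ('('::'_'::')'::rest) (3 + i) = pieceN nw rest i := by
        intro i
        have e1 : 3 + i = (i + 1) + 2 := by omega
        rw [e1, pieceN_shift1']
        have e2 : i + 1 + 1 = i + 2 := by omega
        rw [e2, pieceN_shift1']
        exact pieceN_shift1 nw ')' rest (by rintro r h -; simp at h) i
      rw [h3]
      simp only [List.map_cons, List.map_nil, List.flatten_cons, List.flatten_nil, p0, p1, p2]
      have : (List.map (pieceN nw ('('::'_'::')'::rest) ∘ fun x => 3 + x) (List.range rest.length))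
          = List.map (pieceN nw rest) (List.range rest.length) := by
        apply List.map_congr_left; intro i _; exact hsh i
      rw [this, ih]
      show _ = '(' :: (nw ++ ')' :: repl nw rest)
      simp
  | case2 c rest hn ih =>
      have hlen : ((c :: rest) : List Char).length = rest.length + 1 := by simp
      rw [hlen, List.range_succ_eq_map]
      simp only [List.map_cons, List.flatten_cons, List.map_map]
      have p0 : pieceN nw (c::rest) 0 = [c] := by simp [pieceN]
      have : (List.map (pieceN nw (c::rest) ∘ Nat.succ) (List.range rest.length))
          = List.map (pieceN nw rest) (List.range rest.length) := by
        apply List.map_congr_left; intro i _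
        exact pieceN_shift1 nw c rest hn i
      rw [p0, this, ih, repl_cons nw c rest hn]
      rfl

-- B as the flatten of the per-position pieces
theorem B_chars (t p : String) :
    (replace_blank_alt t p).toList
    = ((List.range p.toList.length).map (pieceN t.toList p.toList)).flatten := by
  rw [flattenN]
  show (PySem.Str.replace p "(_)" ("(" ++ t ++ ")")).toList = _
  rw [PySem.Str.toList_replace]
  have ho : ("(_)" : String).toList = ['(','_',')'] := by decide
  have hn : (("(" ++ t ++ ")") : String).toList = '(' :: (t.toList ++ [')']) := by simp
  rw [ho, hn, PySem.Chars.replace]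
  rw [if_neg (by simp)]
  rw [go_spec t.toList p.toList.length p.toList [] le_rfl]
  simp

-- A's piece and B's piece agree at every positive index (no hypothesis on D_ needed there)
theorem piece_eq_pos (t p : String) (i : Nat) (h1 : 1 ≤ i) (hi : i < p.toList.length) :
    (if condC p.toList (i : Int) = true then t else String.ofList [p.toList.getD i ' ']).toList
    = pieceN t.toList p.toList i := by
  have e1 : PySem.List.pyGet? p.toList (i : Int) = some p.toList[i] := by
    rw [PySem.List.pyGet?_natCast, List.getElem?_eq_getElem hi]
  have em : ((i : Int) - 1) = ((i - 1 : Nat) : Int) := by omega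
  have e2 : PySem.List.pyGet? p.toList ((i : Int) - 1) = some p.toList[i-1] := by
    rw [em, PySem.List.pyGet?_natCast, List.getElem?_eq_getElem (by omega)]
  have e3 : PySem.List.pyGet? p.toList ((i : Int) + 1) = p.toList[i+1]? := by
    rw [show ((i : Int) + 1) = ((i + 1 : Nat) : Int) by omega, PySem.List.pyGet?_natCast]
  have hcond : (condC p.toList (i : Int) = true)
      ↔ (1 ≤ i ∧ i + 1 < p.toList.length ∧ p.toList[i]? = some '_' ∧ p.toList[i-1]? = some '(' ∧ p.toList[i+1]? = some ')') := by
    unfold condC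
    simp only [Bool.and_eq_true, beq_iff_eq, e1, e2, e3, Option.some.injEq]
    constructor
    · rintro ⟨⟨a, b⟩, c⟩
      have hlt : i + 1 < p.toList.length := by
        by_contra hnlt
        rw [List.getElem?_eq_none_iff.mpr (by omega)] at c
        cases c
      exact ⟨h1, hlt, by rw [List.getElem?_eq_getElem hi, a], by rw [List.getElem?_eq_getElem (show i - 1 < p.toList.length by omega), b], c⟩
    · rintro ⟨-, hlt, a, b, c⟩
      rw [List.getElem?_eq_getElem hi] at a
      rw [List.getElem?_eq_getElem (show i - 1 < p.toList.length by omega)] at b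
      exact ⟨⟨by injection a, by injection b⟩, c⟩
  rw [pieceN]
  by_cases hc : condC p.toList (i : Int) = true
  · rw [if_pos hc, if_pos (hcond.mp hc)]
  · rw [if_neg hc, if_neg (fun hh => hc (hcond.mpr hh))]
    simp

-- at index 0 they agree outside D_ (B never wraps; A only differs inside D_)
theorem piece_eq_zero (t p : String) (hD : ¬ D_replace_blank t p) (h0 : 0 < p.toList.length) :
    (if condC p.toList ((0 : Nat) : Int) = true then t else String.ofList [p.toList.getD 0 ' ']).toList
    = pieceN t.toList p.toList 0 := by
  rw [pieceN_zero]
  by_cases hc : condC p.toList ((0 : Nat) : Int) = true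
  · -- the wrap condition holds, so ¬ D_ forces topping = "_", which is also the character kept
    rw [if_pos hc]
    unfold condC at hc
    simp only [Bool.and_eq_true, beq_iff_eq] at hc
    obtain ⟨⟨h1, h2⟩, h3⟩ := hc
    have hz : PySem.List.pyGet? p.toList ((0 : Nat) : Int) = p.toList[0]? := by
      rw [PySem.List.pyGet?_natCast]
    have ht : t = "_" := by
      by_contra hne
      exact hD ⟨hne, by rw [← hz]; exact h1,
        by rw [show (((0 : Nat) : Int) + 1) = ((1 : Nat) : Int) by omega, PySem.List.pyGet?_natCast] at h3; exact h3,
        by rw [show (((0 : Nat) : Int) - 1) = (-1 : Int) by omega] at h2; exact h2⟩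
    rw [ht]
    have : p.toList.getD 0 ' ' = '_' := by
      rw [hz, List.getElem?_eq_getElem h0] at h1
      rw [List.getD_eq_getElem?_getD, List.getElem?_eq_getElem h0]
      simpa using h1
    rw [this]
    rfl
  · rw [if_neg hc]; simp

-- ===== VERDICT (by name: the statement is the Claim_ definition above) =====
theorem replace_blank_spec : Claim_unchanged_replace_blank := by
  intro t p _ _
  unfold Spec_replace_blank
  intro hD
  apply String.toList_inj.mp
  rw [A_chars, B_chars]
  congr 1
  apply List.map_congr_left
  intro i hi
  have hi' : i < p.toList.length := List.mem_range.mp hi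
  rcases Nat.eq_zero_or_pos i with h0 | h1
  · subst h0; exact piece_eq_zero t p hD hi'
  · exact piece_eq_pos t p i h1 hi'

theorem replace_blank_changed : Claim_changed_replace_blank := by
  unfold Claim_changed_replace_blank; decide

theorem replace_blank_tight : Claim_exact_replace_blank := by
  intro t p _ _ hD hEq
  obtain ⟨hne, h0, h1, hw⟩ := hD
  have hlen : 2 ≤ p.toList.length := by
    by_contra h
    rw [List.getElem?_eq_none_iff.mpr (by omega)] at h1
    simp at h1
  have h0' : 0 < p.toList.length := by omega
  have hEq' := congrArg String.toList hEq
  rw [A_chars, B_chars] at hEq'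
  -- split off index 0
  obtain ⟨m, hm⟩ : ∃ m, p.toList.length = m + 1 := ⟨p.toList.length - 1, by omega⟩
  have hrange : List.range p.toList.length = 0 :: List.map Nat.succ (List.range m) := by
    rw [hm, List.range_succ_eq_map]
  rw [hrange, List.map_cons, List.map_cons, List.flatten_cons, List.flatten_cons,
    List.map_map, List.map_map] at hEq'
  have htails :
      (List.map ((fun (i : Nat) => (if condC p.toList (i : Int) = true then t else String.ofList [p.toList.getD i ' ']).toList) ∘ Nat.succ) (List.range m))
      = (List.map (pieceN t.toList p.toList ∘ Nat.succ) (List.range m)) := by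
    apply List.map_congr_left
    intro i hi
    simp only [Function.comp_apply]
    have hi' : i < m := List.mem_range.mp hi
    exact piece_eq_pos t p (i + 1) (by omega) (by omega)
  rw [htails] at hEq'
  -- A's head piece is topping (the wrap condition holds inside D_), B's is the '_' kept
  have hc0 : condC p.toList ((0 : Nat) : Int) = true := by
    unfold condC
    simp only [Bool.and_eq_true, beq_iff_eq]
    refine ⟨⟨by rw [PySem.List.pyGet?_natCast]; exact h0, ?_⟩, ?_⟩
    · rw [show (((0 : Nat) : Int) - 1) = (-1 : Int) by omega]; exact hw
    · rw [show (((0 : Nat) : Int) + 1) = ((1 : Nat) : Int) by omega, PySem.List.pyGet?_natCast]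
      exact h1
  rw [if_pos hc0, pieceN_zero] at hEq'
  have hgd0 : p.toList.getD 0 ' ' = '_' := by
    rw [List.getD_eq_getElem?_getD, h0]; rfl
  rw [hgd0] at hEq'
  have ht : t.toList = ['_'] := List.append_cancel_right hEq'
  exact hne (String.toList_inj.mp (by rw [ht]; rfl))
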